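-- pv_equiv track=rewrite | github.com/ange-projects/SAE24 | scripts/grille.py | generer_grille
-- ===== SOURCE A (Python) =====
-- def generer_grille(n):
--     grille = []
--     numero = 1
--
--     for i in range(n-1, -1, -1):
--         ligne = []
--         for j in range(n):
--             case = i + j * n + 1
--             ligne.append(case)
--         grille.append(ligne)
--
--     return grille
-- ===== SOURCE B (Python) =====
-- def generer_grille(n):
--     # Preallocate the n x n grid and fill it column by column, bottom-up,
--     # with a running counter instead of a per-cell closed-form formula.
--     grille = [[0] * n for _ in range(n)]
--     numero = 1
--     for j in range(n):
--         for k in range(n - 1, -1, -1):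
--             grille[k][j] = numero
--             numero += 1
--     return grille
-- ===== Notes on version B (the rewrite author's own statement) =====
-- stated objective: alternative
-- what changed: Replaces the per-cell closed-form arithmetic (case = i + j*n + 1) built row by row with append, by a preallocated n x n grid filled column by column bottom-up with a single running counter and indexed assignment.
import Mathlib
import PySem

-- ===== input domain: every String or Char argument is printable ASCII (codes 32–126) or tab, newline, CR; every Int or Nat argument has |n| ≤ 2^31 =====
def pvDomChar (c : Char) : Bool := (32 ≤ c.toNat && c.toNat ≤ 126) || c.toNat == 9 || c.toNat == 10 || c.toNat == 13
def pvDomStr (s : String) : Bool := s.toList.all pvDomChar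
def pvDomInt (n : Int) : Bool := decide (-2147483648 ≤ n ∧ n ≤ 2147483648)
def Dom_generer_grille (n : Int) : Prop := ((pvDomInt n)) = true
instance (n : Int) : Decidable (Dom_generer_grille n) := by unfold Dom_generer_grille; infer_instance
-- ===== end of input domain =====

-- B builds the same n×n grid by a different decomposition: a preallocated grid filled
-- column-by-column bottom-up with a running counter and indexed assignment, instead of
-- A's per-cell closed-form arithmetic appended row by row (objective: alternative).

-- ===== PORT A =====
def generer_grille (n : Int) : List (List Int) :=
  (PySem.List.pyRange (n-1) (-1) (-1)).foldl
    (fun grille i =>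
      let ligne := (PySem.List.pyRange 0 n 1).foldl
        (fun ligne j => ligne ++ [i + j * n + 1]) []
      grille ++ [ligne])
    []

-- ===== PORT B =====
-- 'grille[k][j] = numero; numero += 1' (indices always in range here) → pySetD / pyGetD
def pvSetCell (j : Int) (st : List (List Int) × Int) (k : Int) : List (List Int) × Int :=
  (PySem.List.pySetD st.1 k (PySem.List.pySetD (PySem.List.pyGetD st.1 k []) j st.2), st.2 + 1)

def generer_grille_alt (n : Int) : List (List Int) :=
  let grille : List (List Int) :=
    (PySem.List.pyRange 0 n 1).foldl (fun g _ => g ++ [PySem.List.pyRepeat [(0:Int)] n]) []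
  ((PySem.List.pyRange 0 n 1).foldl
      (fun st j => (PySem.List.pyRange (n-1) (-1) (-1)).foldl (pvSetCell j) st)
      (grille, 1)).1

-- ===== PRECONDITION & SPEC =====
def Spec_generer_grille (n : Int) (out : List (List Int)) : Prop := out = generer_grille_alt n
instance (n : Int) (out : List (List Int)) : Decidable (Spec_generer_grille n out) := by unfold Spec_generer_grille; infer_instance

-- ===== CLAIM (what is proved, stated in full; the proofs are below) =====
def Claim_equal_generer_grille : Prop := ∀ (n : Int), Dom_generer_grille n → Spec_generer_grille n (generer_grille n)

-- ===== LEMMAS AND PROOFS =====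

-- the common closed form both programs compute: row m, column p holds (n-1-m) + p*n + 1
def pvT (n : Int) : List (List Int) :=
  (List.range n.toNat).map (fun (m : Nat) =>
    (List.range n.toNat).map (fun (p : Nat) => (n - 1 - (m : Int)) + (p : Int) * n + 1))

theorem pvA_eq_T (n : Int) : generer_grille n = pvT n := by
  unfold generer_grille pvT
  simp only [PySem.List.foldl_append_singleton_eq_map, PySem.List.pyRange_neg_one,
    PySem.List.pyRange_one, List.map_map, List.nil_append]
  have h1 : n - 1 - -1 = n := by ring
  have h2 : n - 0 = n := by ring
  rw [h1, h2]
  apply List.map_congr_left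
  intro k hk
  apply List.map_congr_left
  intro p hp
  simp only [Function.comp]
  ring

theorem pvGetD_range (g : List (List Int)) :
    (List.range g.length).map (fun m => g[m]?.getD []) = g := by
  apply List.ext_getElem
  · simp
  · intro i h1 h2
    simp [List.getElem?_eq_getElem (by simpa using h2)]

-- inner column loop of B: the countdown fold from k-1 to 0 sets, in every row m < k,
-- position j to c + (k-1-m), and adds k to the counter
theorem pvInner (j : Int) (k : Nat) (g : List (List Int)) (c : Int) (hk : k ≤ g.length) :
    (PySem.List.pyRange ((k : Int) - 1) (-1) (-1)).foldl (pvSetCell j) (g, c)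
      = ((List.range g.length).map (fun m =>
            if m < k then PySem.List.pySetD (g.getD m []) j (c + ((k : Int) - 1 - (m:Int))) else g.getD m []),
         c + k) := by
  induction k generalizing g c with
  | zero =>
      rw [PySem.List.pyRange_neg_one_eq_nil (by norm_num)]
      simp only [List.foldl_nil, Nat.cast_zero, add_zero]
      refine Prod.ext ?_ rfl
      simp only [Nat.not_lt_zero, if_false, List.getD_eq_getElem?_getD]
      exact (pvGetD_range g).symm
  | succ k ih =>
      have hcons : PySem.List.pyRange ((k+1 : Nat) - 1) (-1) (-1)
          = ((k:Int)) :: PySem.List.pyRange ((k:Int) - 1) (-1) (-1) := by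
        push_cast
        rw [PySem.List.pyRange_neg_one_cons (by omega)]
        norm_num
      rw [hcons, List.foldl_cons]
      have hklt : k < g.length := by omega
      have hstep : pvSetCell j (g, c) (k : Int)
          = (g.set k (PySem.List.pySetD (g.getD k []) j c), c + 1) := by
        simp [pvSetCell, PySem.List.pySetD_natCast, PySem.List.pyGetD_natCast]
      rw [hstep, ih _ _ (by simp; omega)]
      refine Prod.ext ?_ (by push_cast; ring)
      simp only [List.length_set]
      apply List.map_congr_left
      intro m hm
      simp only [List.mem_range] at hm
      by_cases hmk : m = k
      · subst hmk
        simp [List.getD_eq_getElem?_getD, List.getElem?_set_eq_of_lt _ hklt]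
      · have hset : (g.set k (PySem.List.pySetD (g[k]?.getD []) j c))[m]? = g[m]? :=
          List.getElem?_set_ne (by omega)
        simp only [List.getD_eq_getElem?_getD, hset]
        by_cases hlt : m < k
        · simp only [hlt, if_true, if_pos (by omega : m < k + 1)]
          have : c + 1 + ((k:Int) - 1 - (m:Int)) = c + ((k+1 : Nat) - 1 - (m:Int)) := by
            push_cast; ring
          rw [this]
        · simp only [hlt, if_false, if_neg (by omega : ¬ m < k + 1)]

theorem pvSetRow (N : Nat) (f : Nat → Int) (j : Nat) (v : Int) (hj : j < N) :
    ((List.range N).map f).set j v = (List.range N).map (fun p => if p = j then v else f p) := by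
  apply List.ext_getElem
  · simp
  · intro i h1 h2
    have hi : i < N := by simpa using h2
    by_cases h : i = j
    · subst h; simp
    · simp only [List.getElem_set, List.getElem_map, List.getElem_range]
      rw [if_neg (fun hji => h hji.symm), if_neg h]

-- outer loop of B: after the first j columns, cells (m, p) with p < j hold their final
-- value (n-1-m) + p*n + 1 and the counter is 1 + j*n
theorem pvOuter (n : Int) (N : Nat) (hNn : (N : Int) = n) (j : Nat) (hj : j ≤ N) :
    (PySem.List.pyRange 0 (j : Int) 1).foldl
        (fun st j' => (PySem.List.pyRange (n-1) (-1) (-1)).foldl (pvSetCell j') st)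
        (List.replicate N (List.replicate N 0), 1)
      = ((List.range N).map (fun (m : Nat) =>
            (List.range N).map (fun (p : Nat) =>
              if p < j then (n - 1 - (m:Int)) + (p:Int) * n + 1 else 0)),
         1 + (j:Int) * n) := by
  subst hNn
  induction j with
  | zero =>
      rw [PySem.List.pyRange_one_eq_nil (by norm_num)]
      simp only [List.foldl_nil, Nat.cast_zero, zero_mul, add_zero]
      refine Prod.ext ?_ rfl
      simp only [Nat.not_lt_zero, if_false]
      rw [List.map_const', List.map_const']
      simp
  | succ j ih =>
      have hj' : j ≤ N := by omega
      have hcons : PySem.List.pyRange 0 ((j+1 : Nat) : Int) 1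
          = PySem.List.pyRange 0 (j : Int) 1 ++ [(j : Int)] := by
        push_cast
        exact PySem.List.pyRange_one_succ_right (by positivity)
      rw [hcons, List.foldl_append, ih hj', List.foldl_cons, List.foldl_nil]
      have hlen : ((List.range N).map (fun (m : Nat) =>
            (List.range N).map (fun (p : Nat) =>
              if p < j then ((N:Int) - 1 - (m:Int)) + (p:Int) * (N:Int) + 1 else 0))).length = N := by simp
      rw [pvInner (j:Int) N _ _ (by rw [hlen])]
      refine Prod.ext ?_ (by push_cast; ring)
      rw [hlen]
      apply List.map_congr_left
      intro m hm
      simp only [List.mem_range] at hm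
      have hrow : ((List.range N).map (fun (m : Nat) =>
            (List.range N).map (fun (p : Nat) =>
              if p < j then ((N:Int) - 1 - (m:Int)) + (p:Int) * (N:Int) + 1 else 0))).getD m []
          = (List.range N).map (fun (p : Nat) =>
              if p < j then ((N:Int) - 1 - (m:Int)) + (p:Int) * (N:Int) + 1 else 0) := by
        simp [List.getD_eq_getElem?_getD, List.getElem?_map,
          List.getElem?_range hm]
      rw [if_pos hm, hrow, PySem.List.pySetD_natCast, pvSetRow N _ j _ (by omega)]
      apply List.map_congr_left
      intro p hp
      simp only [List.mem_range] at hp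
      by_cases hpj : p = j
      · subst hpj
        rw [if_pos rfl, if_pos (by omega)]
        ring
      · rw [if_neg hpj]
        by_cases hplt : p < j
        · rw [if_pos hplt, if_pos (by omega)]
        · rw [if_neg hplt, if_neg (by omega)]

theorem pvB_eq_T (n : Int) : generer_grille_alt n = pvT n := by
  unfold generer_grille_alt pvT
  by_cases hn : n ≤ 0
  · rw [PySem.List.pyRange_one_eq_nil hn]
    simp [Int.toNat_of_nonpos hn]
  · replace hn : 0 < n := by omega
    have hNn : ((n.toNat : Int)) = n := Int.toNat_of_nonneg hn.le
    have hg0 : (PySem.List.pyRange 0 n 1).foldl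
        (fun g _ => g ++ [PySem.List.pyRepeat [(0:Int)] n]) []
        = List.replicate n.toNat (List.replicate n.toNat 0) := by
      rw [PySem.List.foldl_append_singleton_eq_map]
      simp only [List.nil_append, PySem.List.pyRepeat_singleton]
      rw [List.map_const', PySem.List.length_pyRange_one]
      norm_num
    rw [hg0]
    rw [show n = ((n.toNat : Nat) : Int) from hNn.symm]
    simp only [Int.toNat_natCast]
    rw [pvOuter ((n.toNat : Nat) : Int) n.toNat rfl n.toNat le_rfl]
    apply List.map_congr_left
    intro m hm
    apply List.map_congr_left
    intro p hp
    simp only [List.mem_range] at hp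
    rw [if_pos hp]

-- ===== VERDICT (by name: the statement is the Claim_ definition above) =====
theorem generer_grille_spec : Claim_equal_generer_grille := by
  intro n _
  show generer_grille n = generer_grille_alt n
  rw [pvA_eq_T, pvB_eq_T]
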